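-- pv_equiv track=rewrite | github.com/SundasNoreen/PythonPrograms | Problem Set 2 Task 4.py | is_n_solveable
-- ===== SOURCE A (Python) =====
-- def is_n_solveable(n,packages):     # n is the total number of nuggets.
-- 	a = 0	                         # Initializing the multiples of each package size.
-- 	b = 0
-- 	c = 0
-- 	for a in range(10):
-- 		if packages[0]*a + packages[1]*b + packages[2]*c == n:
-- 			return 1
-- 		for b in range(10):
-- 			if packages[0]*a + packages[1]*b + packages[2]*c == n:
-- 				return 1
-- 			for c in range(10):
-- 				if packages[0]*a + packages[1]*b + packages[2]*c == n:
-- 					return 1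
-- 	return 0
-- ===== SOURCE B (Python) =====
-- def is_n_solveable(n, packages):
--     # Precompute achievable third-package contributions once; then only a double loop.
--     cset = {packages[2] * c for c in range(10)}
--     if any(n - packages[0] * a - packages[1] * b in cset
--            for a in range(10) for b in range(10)):
--         return 1
--     return 0
-- ===== Notes on version B (the rewrite author's own statement) =====
-- stated objective: alternative
-- what changed: Replaced the triple nested loop (with redundant early checks on leftover loop state) by a precomputed set of the third package's ten achievable contributions plus a double loop testing membership of the residual.
import Mathlib
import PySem

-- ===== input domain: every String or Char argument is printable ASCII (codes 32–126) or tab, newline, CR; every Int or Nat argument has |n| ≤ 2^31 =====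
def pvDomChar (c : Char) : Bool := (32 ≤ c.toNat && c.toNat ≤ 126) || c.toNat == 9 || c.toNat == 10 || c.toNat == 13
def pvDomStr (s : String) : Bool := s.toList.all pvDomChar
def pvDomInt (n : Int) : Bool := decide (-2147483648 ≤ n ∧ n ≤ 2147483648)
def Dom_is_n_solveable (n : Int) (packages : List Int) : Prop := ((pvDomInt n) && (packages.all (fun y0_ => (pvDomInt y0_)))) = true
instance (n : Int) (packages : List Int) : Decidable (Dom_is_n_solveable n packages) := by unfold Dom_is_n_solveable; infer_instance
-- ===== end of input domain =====

-- B replaces A's triple nested loop by a precomputed set of the third package's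
-- contributions plus a double loop with a membership test (objective: alternative).

-- ===== PORT A =====
-- innermost 'for c in range(10)': returns (early-return value, final value of c)
def loopC (p0 p1 p2 n a b : Int) : List Int → Int → Option Int × Int
  | [], c => (none, c)
  | cv :: rest, _ =>
    if p0 * a + p1 * b + p2 * cv = n then (some 1, cv)
    else loopC p0 p1 p2 n a b rest cv

-- middle 'for b in range(10)': carries the leftover c state; returns (value, b, c)
def loopB (p0 p1 p2 n a : Int) : List Int → Int → Int → Option Int × Int × Int
  | [], b, c => (none, b, c)
  | bv :: rest, _, c =>
    if p0 * a + p1 * bv + p2 * c = n then (some 1, bv, c)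
    else
      match loopC p0 p1 p2 n a bv (PySem.List.pyRange 0 10 1) c with
      | (some r, c') => (some r, bv, c')
      | (none, c') => loopB p0 p1 p2 n a rest bv c'

-- outer 'for a in range(10)': carries the leftover b, c state
def loopA (p0 p1 p2 n : Int) : List Int → Int → Int → Option Int
  | [], _, _ => none
  | av :: rest, b, c =>
    if p0 * av + p1 * b + p2 * c = n then some 1
    else
      match loopB p0 p1 p2 n av (PySem.List.pyRange 0 10 1) b c with
      | (some r, _, _) => some r
      | (none, b', c') => loopA p0 p1 p2 n rest b' c'

def is_n_solveable (n : Int) (packages : List Int) : Int :=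
  let p0 := (PySem.List.pyGet? packages 0).getD 0  -- IndexError excluded by Pre_
  let p1 := (PySem.List.pyGet? packages 1).getD 0
  let p2 := (PySem.List.pyGet? packages 2).getD 0
  match loopA p0 p1 p2 n (PySem.List.pyRange 0 10 1) 0 0 with
  | some r => r
  | none => 0

-- ===== PORT B =====
def is_n_solveable_alt (n : Int) (packages : List Int) : Int :=
  let p0 := (PySem.List.pyGet? packages 0).getD 0  -- IndexError excluded by Pre_
  let p1 := (PySem.List.pyGet? packages 1).getD 0
  let p2 := (PySem.List.pyGet? packages 2).getD 0
  let cset : PySem.Set Int :=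
    PySem.Set.ofList ((PySem.List.pyRange 0 10 1).map (fun c => p2 * c))
  if (PySem.List.pyRange 0 10 1).any (fun a =>
       (PySem.List.pyRange 0 10 1).any (fun b =>
         PySem.Set.contains cset (n - p0 * a - p1 * b)))
  then 1 else 0

-- ===== PRECONDITION & SPEC =====
-- A indexes packages[0..2]: fewer than three packages raises IndexError in A.
def Pre_is_n_solveable (n : Int) (packages : List Int) : Prop := 3 ≤ packages.length
instance (n : Int) (packages : List Int) : Decidable (Pre_is_n_solveable n packages) := by unfold Pre_is_n_solveable; infer_instance
def pvWitness_is_n_solveable : Int × List Int := (43, [2, 3, 5])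

def Spec_is_n_solveable (n : Int) (packages : List Int) (out : Int) : Prop := out = is_n_solveable_alt n packages
instance (n : Int) (packages : List Int) (out : Int) : Decidable (Spec_is_n_solveable n packages out) := by unfold Spec_is_n_solveable; infer_instance

-- ===== CLAIM (what is proved, stated in full; the proofs are below) =====
def Claim_equal_is_n_solveable : Prop := ∀ (n : Int) (packages : List Int), Dom_is_n_solveable n packages → Pre_is_n_solveable n packages → Spec_is_n_solveable n packages (is_n_solveable n packages)

-- ===== LEMMAS AND PROOFS =====

lemma loopC_fst (p0 p1 p2 n a b : Int) (cs : List Int) (c : Int) :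
    (loopC p0 p1 p2 n a b cs c).1 =
      if ∃ cv ∈ cs, p0 * a + p1 * b + p2 * cv = n then some 1 else none := by
  induction cs generalizing c with
  | nil => simp [loopC]
  | cons cv rest ih =>
    simp only [loopC]
    by_cases h : p0 * a + p1 * b + p2 * cv = n
    · rw [if_pos h, if_pos ⟨cv, List.mem_cons_self, h⟩]
    · rw [if_neg h, ih]
      congr 1
      simp only [List.mem_cons, eq_iff_iff]
      constructor
      · rintro ⟨cv', hm, hcv⟩; exact ⟨cv', Or.inr hm, hcv⟩
      · rintro ⟨cv', hm, hcv⟩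
        rcases hm with rfl | hm
        · exact absurd hcv h
        · exact ⟨cv', hm, hcv⟩

lemma loopC_snd (p0 p1 p2 n a b : Int) (cs : List Int) (c : Int) :
    (loopC p0 p1 p2 n a b cs c).2 = c ∨ (loopC p0 p1 p2 n a b cs c).2 ∈ cs := by
  induction cs generalizing c with
  | nil => left; rfl
  | cons cv rest ih =>
    simp only [loopC]
    by_cases h : p0 * a + p1 * b + p2 * cv = n
    · rw [if_pos h]; right; exact List.mem_cons_self
    · rw [if_neg h]
      rcases ih cv with h' | h'
      · right; rw [h']; exact List.mem_cons_self
      · right; exact List.mem_cons_of_mem _ h'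

lemma loopB_fst (p0 p1 p2 n a : Int) (bs : List Int) (b c : Int)
    (hc : c ∈ PySem.List.pyRange 0 10 1) :
    (loopB p0 p1 p2 n a bs b c).1 =
      if ∃ bv ∈ bs, ∃ cv ∈ PySem.List.pyRange 0 10 1, p0 * a + p1 * bv + p2 * cv = n
      then some 1 else none := by
  induction bs generalizing b c with
  | nil => simp [loopB]
  | cons bv rest ih =>
    simp only [loopB]
    by_cases h : p0 * a + p1 * bv + p2 * c = n
    · rw [if_pos h, if_pos ⟨bv, List.mem_cons_self, c, hc, h⟩]
    · rw [if_neg h]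
      have hC := loopC_fst p0 p1 p2 n a bv (PySem.List.pyRange 0 10 1) c
      rcases hp : loopC p0 p1 p2 n a bv (PySem.List.pyRange 0 10 1) c with ⟨r, c'⟩
      rw [hp] at hC
      have hc' : c' ∈ PySem.List.pyRange 0 10 1 := by
        have hS := loopC_snd p0 p1 p2 n a bv (PySem.List.pyRange 0 10 1) c
        rw [hp] at hS
        rcases hS with h' | h'
        · have h'' : c' = c := h'
          rw [h'']; exact hc
        · exact h'
      by_cases hex : ∃ cv ∈ PySem.List.pyRange 0 10 1, p0 * a + p1 * bv + p2 * cv = n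
      · rw [if_pos hex] at hC
        have hr : r = some 1 := hC
        subst hr
        show (some 1 : Option Int) = _
        rw [if_pos ⟨bv, List.mem_cons_self, hex⟩]
      · rw [if_neg hex] at hC
        have hr : r = none := hC
        subst hr
        show (loopB p0 p1 p2 n a rest bv c').1 = _
        rw [ih bv c' hc']
        congr 1
        simp only [List.mem_cons, eq_iff_iff]
        constructor
        · rintro ⟨bv', hm, hcv⟩; exact ⟨bv', Or.inr hm, hcv⟩
        · rintro ⟨bv', hm, hcv⟩
          rcases hm with rfl | hm
          · exact absurd hcv hex
          · exact ⟨bv', hm, hcv⟩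

lemma loopB_snd (p0 p1 p2 n a : Int) (bs : List Int) (b c : Int)
    (hc : c ∈ PySem.List.pyRange 0 10 1) :
    ((loopB p0 p1 p2 n a bs b c).2.1 = b ∨ (loopB p0 p1 p2 n a bs b c).2.1 ∈ bs) ∧
      (loopB p0 p1 p2 n a bs b c).2.2 ∈ PySem.List.pyRange 0 10 1 := by
  induction bs generalizing b c with
  | nil => exact ⟨Or.inl rfl, hc⟩
  | cons bv rest ih =>
    simp only [loopB]
    by_cases h : p0 * a + p1 * bv + p2 * c = n
    · rw [if_pos h]; exact ⟨Or.inr List.mem_cons_self, hc⟩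
    · rw [if_neg h]
      rcases hp : loopC p0 p1 p2 n a bv (PySem.List.pyRange 0 10 1) c with ⟨r, c'⟩
      have hc' : c' ∈ PySem.List.pyRange 0 10 1 := by
        have hS := loopC_snd p0 p1 p2 n a bv (PySem.List.pyRange 0 10 1) c
        rw [hp] at hS
        rcases hS with h' | h'
        · have h'' : c' = c := h'
          rw [h'']; exact hc
        · exact h'
      cases r with
      | some r => exact ⟨Or.inr List.mem_cons_self, hc'⟩
      | none =>
        have hrec := ih bv c' hc'
        refine ⟨?_, hrec.2⟩
        rcases hrec.1 with h' | h'
        · right; show (loopB p0 p1 p2 n a rest bv c').2.1 ∈ _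
          rw [h']; exact List.mem_cons_self
        · right; exact List.mem_cons_of_mem _ h'

lemma loopA_eq (p0 p1 p2 n : Int) (as' : List Int) (b c : Int)
    (hb : b ∈ PySem.List.pyRange 0 10 1) (hc : c ∈ PySem.List.pyRange 0 10 1) :
    loopA p0 p1 p2 n as' b c =
      if ∃ av ∈ as', ∃ bv ∈ PySem.List.pyRange 0 10 1,
          ∃ cv ∈ PySem.List.pyRange 0 10 1, p0 * av + p1 * bv + p2 * cv = n
      then some 1 else none := by
  induction as' generalizing b c with
  | nil => simp [loopA]
  | cons av rest ih =>
    simp only [loopA]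
    by_cases h : p0 * av + p1 * b + p2 * c = n
    · rw [if_pos h, if_pos ⟨av, List.mem_cons_self, b, hb, c, hc, h⟩]
    · rw [if_neg h]
      have hB := loopB_fst p0 p1 p2 n av (PySem.List.pyRange 0 10 1) b c hc
      rcases hp : loopB p0 p1 p2 n av (PySem.List.pyRange 0 10 1) b c with ⟨r, b', c'⟩
      rw [hp] at hB
      by_cases hex : ∃ bv ∈ PySem.List.pyRange 0 10 1,
          ∃ cv ∈ PySem.List.pyRange 0 10 1, p0 * av + p1 * bv + p2 * cv = n
      · rw [if_pos hex] at hB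
        have hr : r = some 1 := hB
        subst hr
        show (some 1 : Option Int) = _
        rw [if_pos ⟨av, List.mem_cons_self, hex⟩]
      · rw [if_neg hex] at hB
        have hr : r = none := hB
        subst hr
        have hsnd := loopB_snd p0 p1 p2 n av (PySem.List.pyRange 0 10 1) b c hc
        rw [hp] at hsnd
        have hc' : c' ∈ PySem.List.pyRange 0 10 1 := hsnd.2
        have hb' : b' ∈ PySem.List.pyRange 0 10 1 := by
          rcases hsnd.1 with h' | h'
          · have h'' : b' = b := h'
            rw [h'']; exact hb
          · exact h'
        show loopA p0 p1 p2 n rest b' c' = _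
        rw [ih b' c' hb' hc']
        congr 1
        simp only [List.mem_cons, eq_iff_iff]
        constructor
        · rintro ⟨av', hm, hrest⟩; exact ⟨av', Or.inr hm, hrest⟩
        · rintro ⟨av', hm, hrest⟩
          rcases hm with rfl | hm
          · exact absurd hrest hex
          · exact ⟨av', hm, hrest⟩

lemma main_eq (p0 p1 p2 n : Int) :
    (match loopA p0 p1 p2 n (PySem.List.pyRange 0 10 1) 0 0 with
     | some r => r
     | none => (0 : Int)) =
      (if (PySem.List.pyRange 0 10 1).any (fun a =>
            (PySem.List.pyRange 0 10 1).any (fun b =>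
              PySem.Set.contains
                (PySem.Set.ofList ((PySem.List.pyRange 0 10 1).map (fun c => p2 * c)))
                (n - p0 * a - p1 * b)))
       then (1 : Int) else 0) := by
  have h0 : (0 : Int) ∈ PySem.List.pyRange 0 10 1 := by decide
  rw [loopA_eq p0 p1 p2 n (PySem.List.pyRange 0 10 1) 0 0 h0 h0]
  have hiff : ((PySem.List.pyRange 0 10 1).any (fun a =>
      (PySem.List.pyRange 0 10 1).any (fun b =>
        PySem.Set.contains
          (PySem.Set.ofList ((PySem.List.pyRange 0 10 1).map (fun c => p2 * c)))
          (n - p0 * a - p1 * b))) = true) ↔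
      (∃ av ∈ PySem.List.pyRange 0 10 1, ∃ bv ∈ PySem.List.pyRange 0 10 1,
        ∃ cv ∈ PySem.List.pyRange 0 10 1, p0 * av + p1 * bv + p2 * cv = n) := by
    simp only [List.any_eq_true, PySem.Set.contains, List.contains_iff_mem,
      PySem.Set.mem_ofList, List.mem_map]
    constructor
    · rintro ⟨av, hav, bv, hbv, cv, hcv, heq⟩
      exact ⟨av, hav, bv, hbv, cv, hcv, by linarith⟩
    · rintro ⟨av, hav, bv, hbv, cv, hcv, heq⟩
      exact ⟨av, hav, bv, hbv, cv, hcv, by linarith⟩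
  by_cases hex : ∃ av ∈ PySem.List.pyRange 0 10 1, ∃ bv ∈ PySem.List.pyRange 0 10 1,
      ∃ cv ∈ PySem.List.pyRange 0 10 1, p0 * av + p1 * bv + p2 * cv = n
  · rw [if_pos hex, if_pos (hiff.mpr hex)]
  · rw [if_neg hex, if_neg (fun hany => hex (hiff.mp hany))]

-- ===== VERDICT (by name: the statement is the Claim_ definition above) =====
theorem is_n_solveable_spec : Claim_equal_is_n_solveable := by
  intro n packages _ _
  unfold Spec_is_n_solveable
  exact main_eq ((PySem.List.pyGet? packages 0).getD 0)
    ((PySem.List.pyGet? packages 1).getD 0)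
    ((PySem.List.pyGet? packages 2).getD 0) n
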